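-- pv_equiv track=rewrite | github.com/CoLoDot/algorithms | wolves/level_3.py | animals_
-- ===== SOURCE A (Python) =====
-- def animals_(days):
--     wolves = 1
--     sheeps = 2
--     snakes = 3
--
--     for day in range(1, days):
--         wolves = wolves + snakes
--         snakes = snakes + sheeps
--         sheeps = sheeps + wolves
--
--     return "Wolves: {}\n" \
--            "Sheeps: {}\n" \
--            "Snakes: {}".format(wolves, sheeps, snakes)
-- ===== SOURCE B (Python) =====
-- def animals_(days):
--     # Matrix exponentiation of the linear transition on (wolves, sheeps, snakes):
--     # one day maps (w, s, k) to (w + k, s + w + k, k + s).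
--     M = ((1, 0, 1), (1, 1, 1), (0, 1, 1))
--     I = ((1, 0, 0), (0, 1, 0), (0, 0, 1))
--
--     def mul(A, B):
--         return tuple(
--             tuple(sum(A[r][t] * B[t][c] for t in range(3)) for c in range(3))
--             for r in range(3)
--         )
--
--     def mpow(n):
--         if n == 0:
--             return I
--         h = mpow(n // 2)
--         if n % 2 == 0:
--             return mul(h, h)
--         return mul(mul(h, h), M)
--
--     P = mpow(max(days - 1, 0))
--     w = P[0][0] * 1 + P[0][1] * 2 + P[0][2] * 3
--     s = P[1][0] * 1 + P[1][1] * 2 + P[1][2] * 3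
--     k = P[2][0] * 1 + P[2][1] * 2 + P[2][2] * 3
--     return "Wolves: {}\nSheeps: {}\nSnakes: {}".format(w, s, k)
-- ===== Notes on version B (the rewrite author's own statement) =====
-- stated objective: faster
-- what changed: Replaces the day-by-day O(days) loop with binary exponentiation of the 3x3 linear transition matrix applied to the initial (1,2,3) vector.
import Mathlib
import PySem

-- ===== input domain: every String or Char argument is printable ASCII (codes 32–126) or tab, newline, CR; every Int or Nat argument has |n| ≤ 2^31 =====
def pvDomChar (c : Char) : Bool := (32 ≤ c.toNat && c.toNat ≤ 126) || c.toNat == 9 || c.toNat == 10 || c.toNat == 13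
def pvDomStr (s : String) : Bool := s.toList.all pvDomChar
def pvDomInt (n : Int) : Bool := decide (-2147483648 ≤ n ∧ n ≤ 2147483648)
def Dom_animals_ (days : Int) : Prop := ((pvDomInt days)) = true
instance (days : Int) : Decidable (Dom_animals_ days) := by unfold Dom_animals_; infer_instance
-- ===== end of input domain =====

-- B replaces the O(days) day-by-day loop with binary exponentiation of the 3x3 transition matrix (objective: faster, asymptotic).

-- ===== PORT A =====
def animals_ (days : Int) : String :=
  let st := (PySem.List.pyRange 1 days 1).foldl (fun st _ =>
    let wolves := st.1 + st.2.2
    let snakes := st.2.2 + st.2.1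
    let sheeps := st.2.1 + wolves
    (wolves, sheeps, snakes)) (1, 2, 3)
  "Wolves: " ++ PySem.Int.toStr st.1 ++ "\nSheeps: " ++ PySem.Int.toStr st.2.1
    ++ "\nSnakes: " ++ PySem.Int.toStr st.2.2

-- ===== PORT B =====
-- 3x3 integer matrix, row-major (port of Source B's tuple-of-tuples)
structure M3 where
  a : Int
  b : Int
  c : Int
  d : Int
  e : Int
  f : Int
  g : Int
  h : Int
  i : Int
deriving DecidableEq, Repr

def m3M : M3 := ⟨1, 0, 1, 1, 1, 1, 0, 1, 1⟩
def m3I : M3 := ⟨1, 0, 0, 0, 1, 0, 0, 0, 1⟩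

def m3mul (A B : M3) : M3 :=
  ⟨A.a*B.a + A.b*B.d + A.c*B.g, A.a*B.b + A.b*B.e + A.c*B.h, A.a*B.c + A.b*B.f + A.c*B.i,
   A.d*B.a + A.e*B.d + A.f*B.g, A.d*B.b + A.e*B.e + A.f*B.h, A.d*B.c + A.e*B.f + A.f*B.i,
   A.g*B.a + A.h*B.d + A.i*B.g, A.g*B.b + A.h*B.e + A.i*B.h, A.g*B.c + A.h*B.f + A.i*B.i⟩

-- Source B's recursive mpow (binary exponentiation); n : Nat = Python's max(days-1, 0)
def m3pow (n : Nat) : M3 :=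
  if hn : n = 0 then m3I
  else
    let h := m3pow (n / 2)
    if n % 2 = 0 then m3mul h h else m3mul (m3mul h h) m3M
decreasing_by exact Nat.div_lt_self (Nat.pos_of_ne_zero hn) (by norm_num)

def animals__alt (days : Int) : String :=
  let P := m3pow (max (days - 1) 0).toNat
  let w := P.a * 1 + P.b * 2 + P.c * 3
  let s := P.d * 1 + P.e * 2 + P.f * 3
  let k := P.g * 1 + P.h * 2 + P.i * 3
  "Wolves: " ++ PySem.Int.toStr w ++ "\nSheeps: " ++ PySem.Int.toStr s
    ++ "\nSnakes: " ++ PySem.Int.toStr k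

-- ===== PRECONDITION & SPEC =====
def Spec_animals_ (days : Int) (out : String) : Prop := out = animals__alt days
instance (days : Int) (out : String) : Decidable (Spec_animals_ days out) := by unfold Spec_animals_; infer_instance

-- ===== CLAIM (what is proved, stated in full; the proofs are below) =====
def Claim_equal_animals_ : Prop := ∀ (days : Int), Dom_animals_ days → Spec_animals_ days (animals_ days)

-- ===== LEMMAS AND PROOFS =====

-- one day of A's loop, as a function on the state triple
def pvStep (st : Int × Int × Int) : Int × Int × Int :=
  (st.1 + st.2.2, st.2.1 + (st.1 + st.2.2), st.2.2 + st.2.1)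

-- naive power, the reference for the binary one
def pvP : Nat → M3
  | 0 => m3I
  | n + 1 => m3mul (pvP n) m3M

-- apply a matrix to the column vector (w, s, k)
def pvApp (A : M3) (v : Int × Int × Int) : Int × Int × Int :=
  (A.a * v.1 + A.b * v.2.1 + A.c * v.2.2,
   A.d * v.1 + A.e * v.2.1 + A.f * v.2.2,
   A.g * v.1 + A.h * v.2.1 + A.i * v.2.2)

theorem m3mul_assoc (A B C : M3) : m3mul (m3mul A B) C = m3mul A (m3mul B C) := by
  simp only [m3mul, M3.mk.injEq]
  refine ⟨?_, ?_, ?_, ?_, ?_, ?_, ?_, ?_, ?_⟩ <;> ring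

theorem m3mul_I_right (A : M3) : m3mul A m3I = A := by
  simp [m3mul, m3I]

theorem pvP_add (a b : Nat) : pvP (a + b) = m3mul (pvP a) (pvP b) := by
  induction b with
  | zero => simp [pvP, m3mul_I_right]
  | succ b ih => rw [← Nat.add_assoc]; simp [pvP, ih, m3mul_assoc]

theorem m3pow_eq_pvP (n : Nat) : m3pow n = pvP n := by
  induction n using Nat.strong_induction_on with
  | _ n ih =>
    by_cases hn : n = 0
    · subst hn; simp [m3pow, pvP]
    · rw [m3pow]
      simp only [hn, dite_false]
      have ihh : m3pow (n / 2) = pvP (n / 2) :=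
        ih _ (Nat.div_lt_self (Nat.pos_of_ne_zero hn) (by norm_num))
      by_cases hp : n % 2 = 0
      · have : n / 2 + n / 2 = n := by omega
        simp [hp, ihh, ← pvP_add, this]
      · have h1 : n / 2 + n / 2 + 1 = n := by omega
        simp only [hp, if_false, ihh, ← pvP_add]
        rw [show m3mul (pvP (n / 2 + n / 2)) m3M = pvP (n / 2 + n / 2 + 1) from rfl, h1]

theorem pvApp_mul (A B : M3) (v : Int × Int × Int) :
    pvApp (m3mul A B) v = pvApp A (pvApp B v) := by
  simp only [pvApp, m3mul]; refine Prod.ext ?_ (Prod.ext ?_ ?_) <;> simp <;> ring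

theorem pvApp_M (v : Int × Int × Int) : pvApp m3M v = pvStep v := by
  obtain ⟨w, s, k⟩ := v
  simp [pvApp, pvStep, m3M]; constructor <;> ring

theorem pvApp_pvP (n : Nat) (v : Int × Int × Int) :
    pvApp (pvP n) v = pvStep^[n] v := by
  induction n generalizing v with
  | zero => simp [pvP, pvApp, m3I]
  | succ n ih =>
    rw [show pvP (n + 1) = m3mul (pvP n) m3M from rfl, pvApp_mul, pvApp_M,
      Function.iterate_succ_apply, ih]

theorem foldl_const_step {α : Type} (l : List α) (init : Int × Int × Int) :
    l.foldl (fun st _ => pvStep st) init = pvStep^[l.length] init := by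
  induction l generalizing init with
  | nil => rfl
  | cons x xs ih => simp [List.foldl_cons, ih, Function.iterate_succ_apply]

-- ===== VERDICT (by name: the statement is the Claim_ definition above) =====
theorem animals__spec : Claim_equal_animals_ := by
  intro days _
  unfold Spec_animals_ animals_ animals__alt
  have hfun : (fun (st : Int × Int × Int) (_ : Int) =>
      let wolves := st.1 + st.2.2
      let snakes := st.2.2 + st.2.1
      let sheeps := st.2.1 + wolves
      (wolves, sheeps, snakes)) = fun st _ => pvStep st := by
    funext st x; simp [pvStep]
  rw [hfun, foldl_const_step, PySem.List.length_pyRange_one]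
  have hn : (max (days - 1) 0).toNat = (days - 1).toNat := by omega
  rw [hn, m3pow_eq_pvP]
  have := pvApp_pvP (days - 1).toNat (1, 2, 3)
  simp only [pvApp] at this
  rw [← this]
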